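-- pv_equiv track=rewrite | github.com/mahersalman/switch_1 | algorithmic_question/algorithms.py | get_max_score_word
-- ===== SOURCE A (Python) =====
-- def get_char_score(c):
--     return ord(c) - ord('a') + 1
--
-- def get_word_score(word):
--     score = 0
--     for i in word:
--         score += get_char_score(i)
--     return score
--
-- def get_max_score_word(s):
--     highest_score = 0
--     highest_word = ''
--     words = s.split()
--
--     for word in words :
--         curr_score = get_word_score(word)
--
--         if curr_score > highest_score:
--             highest_score = curr_score
--             highest_word = word
--
--     return highest_word
-- ===== SOURCE B (Python) =====
-- def get_max_score_word(s):
--     words = s.split()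
--     scores = [sum(ord(c) - 96 for c in w) for w in words]
--     if scores and max(scores) > 0:
--         return words[scores.index(max(scores))]
--     return ''
-- ===== Notes on version B (the rewrite author's own statement) =====
-- stated objective: alternative
-- what changed: B builds the full score table with a comprehension and then selects words[scores.index(max(scores))] (guarded by max(scores) > 0), replacing A's single streaming running-max loop with separate compute and argmax passes.
import Mathlib
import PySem

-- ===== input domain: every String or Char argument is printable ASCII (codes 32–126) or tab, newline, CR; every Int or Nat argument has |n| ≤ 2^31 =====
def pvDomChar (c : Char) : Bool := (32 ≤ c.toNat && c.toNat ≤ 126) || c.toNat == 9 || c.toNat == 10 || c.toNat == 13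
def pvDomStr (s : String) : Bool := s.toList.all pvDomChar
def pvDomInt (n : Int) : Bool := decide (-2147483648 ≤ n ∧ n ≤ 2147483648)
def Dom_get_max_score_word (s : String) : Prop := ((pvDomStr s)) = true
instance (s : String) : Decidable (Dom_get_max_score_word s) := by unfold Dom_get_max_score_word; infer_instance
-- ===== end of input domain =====

-- B separates score computation from selection (build the full score table, then pick
-- words[scores.index(max(scores))] when max > 0) instead of A's single running-max loop;
-- objective: alternative decomposition, same cost.

-- ===== PORT A =====
def get_char_score (c : Char) : Int := (c.toNat : Int) - 97 + 1

def get_word_score (word : String) : Int :=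
  word.toList.foldl (fun score i => score + get_char_score i) 0

def get_max_score_word (s : String) : String :=
  ((PySem.Str.split₀ s).foldl
    (fun (st : Int × String) word =>
      let curr_score := get_word_score word
      if curr_score > st.1 then (curr_score, word) else st)
    (0, "")).2

-- ===== PORT B =====
def altWordScore (w : String) : Int :=
  (w.toList.map (fun c => (c.toNat : Int) - 96)).sum

def get_max_score_word_alt (s : String) : String :=
  let words := PySem.Str.split₀ s
  let scores := words.map altWordScore
  match PySem.List.max? scores (fun x => x) with
  | none => ""                       -- scores is empty (falsy)
  | some m =>
    if m > 0 then
      match PySem.List.index? scores m with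
      | some k => words.getD k ""    -- words[k]; k is in range since m ∈ scores
      | none => ""                   -- unreachable: m ∈ scores
    else ""

-- ===== PRECONDITION & SPEC =====
def Spec_get_max_score_word (s : String) (out : String) : Prop := out = get_max_score_word_alt s
instance (s : String) (out : String) : Decidable (Spec_get_max_score_word s out) := by unfold Spec_get_max_score_word; infer_instance

-- ===== CLAIM (what is proved, stated in full; the proofs are below) =====
def Claim_equal_get_max_score_word : Prop := ∀ (s : String), Dom_get_max_score_word s → Spec_get_max_score_word s (get_max_score_word s)

-- ===== LEMMAS AND PROOFS =====

theorem altWordScore_eq (w : String) : altWordScore w = get_word_score w := by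
  unfold altWordScore get_word_score get_char_score
  rw [List.sum_eq_foldl, List.foldl_map]
  congr 1
  funext s c
  ring

-- the first word whose score is m (first-index lookup in the score table), "" if none
def sel (ws : List String) (m : Int) : String :=
  match List.idxOf? m (ws.map get_word_score) with
  | some k => ws.getD k ""
  | none => ""

theorem foldl_max_sup (l : List Int) (x b : Int) :
    l.foldl max (x ⊔ b) = x ⊔ l.foldl max b := by
  induction l generalizing b with
  | nil => rfl
  | cons c t ih => simpa [max_assoc] using ih (b ⊔ c)

theorem sel_cons_ne (w : String) (t : List String) (m : Int) (h : get_word_score w ≠ m) :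
    sel (w :: t) m = sel t m := by
  unfold sel
  simp only [List.map_cons, List.idxOf?_cons, beq_iff_eq]
  rw [if_neg h]
  cases List.idxOf? m (t.map get_word_score) <;> simp

theorem sel_cons_self (w : String) (t : List String) :
    sel (w :: t) (get_word_score w) = w := by
  unfold sel
  simp [List.idxOf?_cons]

-- invariant of A's running-max loop, generalizing the accumulator
theorem foldA_char (ws : List String) (hs : Int) (hw : String) :
    ws.foldl (fun (st : Int × String) word =>
        let curr_score := get_word_score word
        if curr_score > st.1 then (curr_score, word) else st) (hs, hw)
    = ((ws.map get_word_score).foldl max hs,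
       if hs < (ws.map get_word_score).foldl max hs
       then sel ws ((ws.map get_word_score).foldl max hs) else hw) := by
  induction ws generalizing hs hw with
  | nil => simp
  | cons w t ih =>
    simp only [List.foldl_cons, List.map_cons]
    have hM := (PySem.List.le_foldl_max (t.map get_word_score) (max hs (get_word_score w))).1
    by_cases hgt : get_word_score w > hs
    · rw [if_pos hgt, ih]
      have hmax : max hs (get_word_score w) = get_word_score w := max_eq_right (le_of_lt hgt)
      rw [hmax] at hM ⊢
      have hhs : hs < (t.map get_word_score).foldl max (get_word_score w) := lt_of_lt_of_le hgt hM
      rw [if_pos hhs]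
      refine Prod.ext rfl ?_
      by_cases hlt : get_word_score w < (t.map get_word_score).foldl max (get_word_score w)
      · rw [if_pos hlt, sel_cons_ne _ _ _ (ne_of_lt hlt)]
      · have hEq : (t.map get_word_score).foldl max (get_word_score w) = get_word_score w :=
          le_antisymm (not_lt.mp hlt) hM
        rw [if_neg hlt, hEq, sel_cons_self]
    · rw [if_neg hgt, ih]
      have hle : get_word_score w ≤ hs := not_lt.mp hgt
      have hmax : max hs (get_word_score w) = hs := max_eq_left hle
      rw [hmax] at hM ⊢
      refine Prod.ext rfl ?_
      by_cases hhs : hs < (t.map get_word_score).foldl max hs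
      · rw [if_pos hhs, if_pos hhs, sel_cons_ne]
        exact ne_of_lt (lt_of_le_of_lt hle hhs)
      · rw [if_neg hhs, if_neg hhs]

-- ===== VERDICT (by name: the statement is the Claim_ definition above) =====
theorem get_max_score_word_spec : Claim_equal_get_max_score_word := by
  intro s _
  show get_max_score_word s = get_max_score_word_alt s
  unfold get_max_score_word get_max_score_word_alt
  simp only [List.map_congr_left (fun w _ => altWordScore_eq w)]
  rw [foldA_char]
  cases hws : PySem.Str.split₀ s with
  | nil => cases PySem.List.max? ([] : List Int) (fun x => x) <;> rfl
  | cons w t =>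
    simp only [List.map_cons, PySem.List.max?_id_cons, PySem.List.index?_eq_idxOf?]
    have hM := (PySem.List.le_foldl_max (t.map get_word_score) (get_word_score w)).1
    have h0 : (0 : Int) ⊔ get_word_score w = max 0 (get_word_score w) := rfl
    rw [List.foldl_cons, show max (0 : Int) (get_word_score w) = (0 : Int) ⊔ get_word_score w from rfl,
        foldl_max_sup]
    by_cases hpos : (0 : Int) < (t.map get_word_score).foldl max (get_word_score w)
    · have : (0 : Int) ⊔ (t.map get_word_score).foldl max (get_word_score w)
          = (t.map get_word_score).foldl max (get_word_score w) := sup_of_le_right (le_of_lt hpos)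
      rw [this, if_pos hpos, if_pos hpos]
      unfold sel
      simp only [List.map_cons]

    · have hle : (t.map get_word_score).foldl max (get_word_score w) ≤ 0 := not_lt.mp hpos
      rw [sup_of_le_left hle, if_neg hpos]
      simp
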